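-- pv_equiv track=rewrite | github.com/kzaorski/jmeter-test-generator | jmeter_gen/core/project_analyzer.py | _generate_jmx_name
-- ===== SOURCE A (Python) =====
-- def _generate_jmx_name(api_title: str) -> str:
--     """Generate recommended JMX filename from API title.
--
--     Converts API title to a standardized JMX filename format:
--     lowercase, spaces to hyphens, appends "-test.jmx"
--
--     Args:
--         api_title: API title from OpenAPI spec
--
--     Returns:
--         Recommended JMX filename
--
--     Example:
--         >>> analyzer = ProjectAnalyzer()
--         >>> analyzer._generate_jmx_name("User Management API")
--         'user-management-api-test.jmx'
--     """
--     # Convert to lowercase and replace spaces/periods with hyphens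
--     filename = api_title.lower().replace(" ", "-").replace(".", "-")
--
--     # Remove any characters that aren't alphanumeric or hyphens
--     filename = "".join(c for c in filename if c.isalnum() or c == "-")
--
--     # Remove consecutive hyphens
--     while "--" in filename:
--         filename = filename.replace("--", "-")
--
--     # Remove leading/trailing hyphens
--     filename = filename.strip("-")
--
--     # Handle empty string case
--     if not filename:
--         return "test.jmx"
--
--     # Append suffix
--     return f"{filename}-test.jmx"
-- ===== SOURCE B (Python) =====
-- def _generate_jmx_name(api_title: str) -> str:
--     """Single left-to-right pass: map space/period to '-', keep alphanumerics,
--     emit a hyphen only when the output is non-empty and doesn't already end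
--     with one, drop everything else; finally remove one trailing hyphen."""
--     out = []
--     for ch in api_title.lower():
--         if ch in " .":
--             ch = "-"
--         if ch.isalnum():
--             out.append(ch)
--         elif ch == "-" and out and out[-1] != "-":
--             out.append("-")
--     if out and out[-1] == "-":
--         out.pop()
--     result = "".join(out)
--     if not result:
--         return "test.jmx"
--     return result + "-test.jmx"
-- ===== Notes on version B (the rewrite author's own statement) =====
-- stated objective: alternative
-- what changed: A normalizes via a multi-pass pipeline (lowercase, two character replaces, a filter, a while-loop repeatedly collapsing doubled hyphens until a fixpoint, then stripping edge hyphens); B builds the name in one left-to-right pass that maps spaces and periods to hyphens, keeps alphanumerics, emits a hyphen only when the output is non-empty and does not already end in one, and finally drops at most one trailing hyphen.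
import Mathlib
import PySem

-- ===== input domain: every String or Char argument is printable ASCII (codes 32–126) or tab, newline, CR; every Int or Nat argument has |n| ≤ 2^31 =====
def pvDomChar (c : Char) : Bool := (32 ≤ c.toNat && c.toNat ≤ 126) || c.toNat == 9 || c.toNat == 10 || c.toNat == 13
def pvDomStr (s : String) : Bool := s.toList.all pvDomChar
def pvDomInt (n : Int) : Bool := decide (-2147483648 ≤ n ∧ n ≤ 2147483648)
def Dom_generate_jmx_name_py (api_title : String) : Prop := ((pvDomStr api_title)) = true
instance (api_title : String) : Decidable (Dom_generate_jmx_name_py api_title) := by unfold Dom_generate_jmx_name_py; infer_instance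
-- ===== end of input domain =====

-- B replaces A's multi-pass pipeline (two replaces, a filter, a replace-until-fixpoint collapse, a strip) by one left-to-right pass that emits hyphens only when allowed; objective: alternative single-pass decomposition.


-- ===== PORT A =====
-- Helper lemmas used by pvCollapse's termination proof (the port cites them by name).
def pvReplHH : List Char → List Char
  | [] => []
  | [c] => [c]
  | a :: b :: t => if a = '-' ∧ b = '-' then '-' :: pvReplHH t else a :: pvReplHH (b :: t)

theorem pv_go_nil (fuel : Nat) (acc : List Char) :
    PySem.Chars.replace.go ['-','-'] ['-'] fuel [] acc = acc.reverse := by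
  cases fuel <;> simp [PySem.Chars.replace.go]

theorem pvReplHH_go (fuel : Nat) (l acc : List Char) (h : l.length ≤ fuel) :
    PySem.Chars.replace.go ['-','-'] ['-'] fuel l acc = acc.reverse ++ pvReplHH l := by
  induction fuel generalizing l acc with
  | zero =>
    have : l = [] := by cases l <;> simp_all
    subst this; simp [pv_go_nil, pvReplHH]
  | succ fuel ih =>
    cases l with
    | nil => simp [pv_go_nil, pvReplHH]
    | cons c t =>
      cases t with
      | nil =>
        by_cases hc : c = '-' <;>
          simp [PySem.Chars.replace.go, List.isPrefixOf, pvReplHH, hc, pv_go_nil]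
      | cons d t' =>
        simp only [List.length_cons] at h
        by_cases hcd : c = '-' ∧ d = '-'
        · obtain ⟨hc, hd⟩ := hcd
          subst hc; subst hd
          simp only [PySem.Chars.replace.go, List.isPrefixOf]
          rw [if_pos (by simp)]
          rw [show List.drop (['-','-'] : List Char).length ('-' :: '-' :: t') = t' from rfl]
          rw [ih t' _ (by omega)]
          simp [pvReplHH]
        · have hpre : (['-','-'] : List Char).isPrefixOf (c :: d :: t') = false := by
            rcases not_and_or.mp hcd with hc | hd
            · simp only [List.isPrefixOf, Bool.and_eq_false_iff]
              left; simp [beq_eq_false_iff_ne]; intro h'; exact absurd h'.symm hc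
            · simp only [List.isPrefixOf, Bool.and_eq_false_iff]
              right; left; simp [beq_eq_false_iff_ne]; intro h'; exact absurd h'.symm hd
          simp only [PySem.Chars.replace.go, hpre, Bool.false_eq_true, if_false]
          rw [ih (d :: t') _ (by simp; omega)]
          simp [pvReplHH, hcd]

theorem pvReplHH_length_le (l : List Char) : (pvReplHH l).length ≤ l.length := by
  induction l using pvReplHH.induct with
  | case1 => simp [pvReplHH]
  | case2 c => simp [pvReplHH]
  | case3 a b t hab ih => simp [pvReplHH, hab]; omega
  | case4 a b t hab ih => simp only [pvReplHH, if_neg hab]; simp at ih ⊢; omega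

theorem pvReplHH_length_lt (l : List Char) (h : ['-','-'] <:+: l) :
    (pvReplHH l).length < l.length := by
  induction l using pvReplHH.induct with
  | case1 => simp at h
  | case2 c =>
    exfalso
    have := h.length_le; simp at this
  | case3 a b t hab ih =>
    have := pvReplHH_length_le t
    simp [pvReplHH, hab]; omega
  | case4 a b t hab ih =>
    have h' : ['-','-'] <:+: (b :: t) := by
      rcases List.infix_cons_iff.mp h with hp | hi
      · exfalso
        rw [List.cons_prefix_cons] at hp
        obtain ⟨ha, hp2⟩ := hp
        rw [List.cons_prefix_cons] at hp2
        exact hab ⟨ha.symm, hp2.1.symm⟩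
      · exact hi
    have := ih h'
    simp only [pvReplHH, if_neg hab]
    simp at this ⊢; omega

theorem pvIsIn_iff (s : List Char) :
    PySem.Chars.isIn ['-','-'] s = true ↔ ['-','-'] <:+: s := by
  have h0 := PySem.Chars.findFrom_natCast_eq_neg_one_iff s ['-','-'] 0 (Nat.zero_le _)
  rw [show ((0 : Nat) : Int) = 0 from rfl, PySem.Chars.findFrom_zero] at h0
  simp only [PySem.Chars.isIn, bne_iff_ne, ne_eq]
  simp at h0
  rw [h0]
  tauto

theorem pvReplace_eq (s : List Char) :
    PySem.Chars.replace s ['-','-'] ['-'] = pvReplHH s := by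
  simp only [PySem.Chars.replace, List.isEmpty_cons, Bool.false_eq_true, if_false]
  exact (pvReplHH_go s.length s [] le_rfl).trans (by simp)

-- the `while "--" in filename:` loop of A
def pvCollapse (s : String) : String :=
  if PySem.Str.isIn "--" s then pvCollapse (PySem.Str.replace s "--" "-") else s
termination_by s.toList.length
decreasing_by
  rename_i h
  have hr : (PySem.Str.replace s "--" "-").toList = pvReplHH s.toList := by
    simp only [PySem.Str.replace]
    rw [String.toList_ofList]
    exact pvReplace_eq s.toList
  rw [hr]
  exact pvReplHH_length_lt s.toList ((pvIsIn_iff s.toList).mp (by simpa [PySem.Str.isIn] using h))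

def generate_jmx_name_py (api_title : String) : String :=
  -- filename = api_title.lower().replace(" ", "-").replace(".", "-")
  let filename := PySem.Str.replace (PySem.Str.replace (PySem.Str.lower api_title) " " "-") "." "-"
  -- filename = "".join(c for c in filename if c.isalnum() or c == "-")
  let filename := String.ofList (filename.toList.filter (fun c => PySem.Chars.isalnum c || c == '-'))
  -- while "--" in filename: filename = filename.replace("--", "-")
  let filename := pvCollapse filename
  -- filename = filename.strip("-")
  let filename := PySem.Str.stripChars filename "-"
  if filename = "" then "test.jmx" else filename ++ "-test.jmx"

-- ===== PORT B =====
def generate_jmx_name_py_alt (api_title : String) : String :=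
  -- single pass over api_title.lower()
  let out := (PySem.Str.lower api_title).toList.foldl (fun out ch =>
      let ch := if ch = ' ' ∨ ch = '.' then '-' else ch
      if PySem.Chars.isalnum ch then out ++ [ch]
      else if ch = '-' ∧ out ≠ [] ∧ out.getLast? ≠ some '-' then out ++ ['-']
      else out) []
  -- if out and out[-1] == "-": out.pop()
  let out := if out ≠ [] ∧ out.getLast? = some '-' then out.dropLast else out
  let result := String.ofList out
  if result = "" then "test.jmx" else result ++ "-test.jmx"

-- ===== PRECONDITION & SPEC =====
def Spec_generate_jmx_name_py (api_title : String) (out : String) : Prop := out = generate_jmx_name_py_alt api_title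
instance (api_title : String) (out : String) : Decidable (Spec_generate_jmx_name_py api_title out) := by unfold Spec_generate_jmx_name_py; infer_instance

-- ===== CLAIM (what is proved, stated in full; the proofs are below) =====
def Claim_equal_generate_jmx_name_py : Prop := ∀ (api_title : String), Dom_generate_jmx_name_py api_title → Spec_generate_jmx_name_py api_title (generate_jmx_name_py api_title)

-- ===== LEMMAS AND PROOFS =====

-- collapse of consecutive hyphens, and absence of adjacent hyphens
def pvDedup : List Char → List Char
  | [] => []
  | [c] => [c]
  | a :: b :: t => if a = '-' ∧ b = '-' then pvDedup (b :: t) else a :: pvDedup (b :: t)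

def pvNoAdj : List Char → Bool
  | [] => true
  | [_] => true
  | a :: b :: t => (!((a == '-') && (b == '-'))) && pvNoAdj (b :: t)

def pvM (c : Char) : Char := if c = ' ' ∨ c = '.' then '-' else c
def pvOk (c : Char) : Bool := PySem.Chars.isalnum c || c == '-'
def pvStep' (acc : List Char) (c : Char) : List Char :=
  if c = '-' then (if acc ≠ [] ∧ acc.getLast? ≠ some '-' then acc ++ ['-'] else acc) else acc ++ [c]

theorem pvHead_pvDedup (l : List Char) : (pvDedup l).head? = l.head? := by
  induction l using pvDedup.induct with
  | case1 => rfl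
  | case2 c => rfl
  | case3 a b t hab ih =>
    obtain ⟨ha, hb⟩ := hab
    subst ha; subst hb
    rw [pvDedup, if_pos ⟨rfl, rfl⟩]
    exact ih
  | case4 a b t hab ih => simp [pvDedup, if_neg hab]

theorem pvDedup_cons (c : Char) (l : List Char) :
    pvDedup (c :: l) = if c = '-' ∧ l.head? = some '-' then pvDedup l else c :: pvDedup l := by
  cases l with
  | nil => simp [pvDedup]
  | cons b t =>
    by_cases h : c = '-' ∧ b = '-'
    · simp [pvDedup, h.1, h.2]
    · rw [pvDedup, if_neg h, if_neg (by simpa using h)]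

theorem pvHead_pvReplHH (l : List Char) : (pvReplHH l).head? = l.head? := by
  induction l using pvReplHH.induct with
  | case1 => rfl
  | case2 c => rfl
  | case3 a b t hab ih =>
    obtain ⟨ha, hb⟩ := hab
    subst ha; subst hb
    rw [pvReplHH, if_pos ⟨rfl, rfl⟩]
    rfl
  | case4 a b t hab ih => simp [pvReplHH, if_neg hab]

theorem pvDedup_pvReplHH (l : List Char) : pvDedup (pvReplHH l) = pvDedup l := by
  induction l using pvReplHH.induct with
  | case1 => rfl
  | case2 c => rfl
  | case3 a b t hab ih =>
    obtain ⟨ha, hb⟩ := hab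
    subst ha; subst hb
    rw [pvReplHH, if_pos ⟨rfl, rfl⟩]
    rw [pvDedup_cons, pvHead_pvReplHH]
    rw [show pvDedup ('-' :: '-' :: t) = pvDedup ('-' :: t) from by simp [pvDedup]]
    rw [pvDedup_cons]
    by_cases ht : t.head? = some '-'
    · rw [if_pos ⟨rfl, ht⟩, if_pos ⟨rfl, ht⟩, ih]
    · rw [if_neg (by simpa using ht), if_neg (by simpa using ht), ih]
  | case4 a b t hab ih =>
    rw [pvReplHH, if_neg hab]
    rw [pvDedup_cons, pvHead_pvReplHH]
    rw [show (b :: t).head? = some b from rfl]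
    rw [ih]
    rw [pvDedup, if_neg hab]
    by_cases h : a = '-' ∧ b = '-'
    · exact absurd h hab
    · rw [if_neg (by simpa using h)]

theorem pvNoAdj_id (l : List Char) (h : pvNoAdj l = true) : pvDedup l = l := by
  induction l using pvDedup.induct with
  | case1 => rfl
  | case2 c => rfl
  | case3 a b t hab ih =>
    exfalso
    obtain ⟨ha, hb⟩ := hab
    subst ha; subst hb
    rw [pvNoAdj] at h
    simp only [Bool.and_eq_true, Bool.not_eq_eq_eq_not, Bool.not_true] at h
    simp at h
  | case4 a b t hab ih =>
    rw [pvNoAdj] at h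
    simp only [Bool.and_eq_true] at h
    rw [pvDedup, if_neg hab, ih h.2]

theorem pvNoAdj_cons_of (c : Char) (l : List Char) (h : pvNoAdj l = true)
    (hc : ¬(c = '-' ∧ l.head? = some '-')) : pvNoAdj (c :: l) = true := by
  cases l with
  | nil => rfl
  | cons b t =>
    rw [pvNoAdj]
    simp only [Bool.and_eq_true]
    refine ⟨?_, h⟩
    by_cases h1 : c = '-' <;> by_cases h2 : b = '-' <;> simp_all

theorem pvNoAdj_pvDedup (l : List Char) : pvNoAdj (pvDedup l) = true := by
  induction l using pvDedup.induct with
  | case1 => rfl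
  | case2 c => rfl
  | case3 a b t hab ih => rw [pvDedup, if_pos hab]; exact ih
  | case4 a b t hab ih =>
    rw [pvDedup, if_neg hab]
    exact pvNoAdj_cons_of a _ ih (by rw [pvHead_pvDedup]; simpa using hab)

theorem pvNotInfix_dedup (l : List Char) (h : ¬ (['-','-'] <:+: l)) : pvDedup l = l := by
  induction l using pvDedup.induct with
  | case1 => rfl
  | case2 c => rfl
  | case3 a b t hab ih =>
    exfalso
    exact h (List.infix_cons_iff.mpr (Or.inl (by
      rw [List.cons_prefix_cons]
      exact ⟨hab.1.symm, by rw [List.cons_prefix_cons]; exact ⟨hab.2.symm, List.nil_prefix⟩⟩)))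
  | case4 a b t hab ih =>
    rw [pvDedup, if_neg hab, ih (fun hi => h (List.infix_cons hi))]

theorem pvCollapse_eq (s : String) : pvCollapse s = String.ofList (pvDedup s.toList) := by
  induction s using pvCollapse.induct with
  | case1 s h ih =>
    rw [pvCollapse, if_pos h, ih]
    have hr : (PySem.Str.replace s "--" "-").toList = pvReplHH s.toList := by
      simp only [PySem.Str.replace]
      rw [String.toList_ofList]
      exact pvReplace_eq s.toList
    rw [hr, pvDedup_pvReplHH]
  | case2 s h =>
    rw [pvCollapse, if_neg h]
    have hni : ¬ (['-','-'] <:+: s.toList) := by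
      intro hi
      exact h (by simpa [PySem.Str.isIn] using (pvIsIn_iff s.toList).mpr hi)
    rw [pvNotInfix_dedup _ hni, String.ofList_toList]

theorem pvReplOne_go (a b : Char) (fuel : Nat) (l acc : List Char) (h : l.length ≤ fuel) :
    PySem.Chars.replace.go [a] [b] fuel l acc
      = acc.reverse ++ l.map (fun c => if c = a then b else c) := by
  induction fuel generalizing l acc with
  | zero =>
    have : l = [] := by cases l <;> simp_all
    subst this; simp [PySem.Chars.replace.go]
  | succ fuel ih =>
    cases l with
    | nil => simp [PySem.Chars.replace.go]
    | cons c t =>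
      simp only [List.length_cons] at h
      by_cases hc : c = a
      · subst hc
        simp only [PySem.Chars.replace.go, List.isPrefixOf]
        rw [if_pos (by simp)]
        rw [show List.drop ([c] : List Char).length (c :: t) = t from rfl]
        rw [ih t _ (by omega)]
        simp
      · have hpre : ([a] : List Char).isPrefixOf (c :: t) = false := by
          simp only [List.isPrefixOf, Bool.and_eq_false_iff]
          left; simp [beq_eq_false_iff_ne]; intro h'; exact absurd h'.symm hc
        simp only [PySem.Chars.replace.go, hpre, Bool.false_eq_true, if_false]
        rw [ih t _ (by omega)]
        simp [hc]

theorem pvReplOne (s : List Char) (a b : Char) :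
    PySem.Chars.replace s [a] [b] = s.map (fun c => if c = a then b else c) := by
  simp only [PySem.Chars.replace, List.isEmpty_cons, Bool.false_eq_true, if_false]
  exact (pvReplOne_go a b s.length s [] le_rfl).trans (by simp)

theorem pvNoAdj_append (acc : List Char) (c : Char) (h : pvNoAdj acc = true)
    (hc : ¬(acc.getLast? = some '-' ∧ c = '-')) : pvNoAdj (acc ++ [c]) = true := by
  induction acc using pvNoAdj.induct with
  | case1 => rfl
  | case2 x =>
    simp only [List.getLast?_singleton, Option.some.injEq] at hc
    show ((!((x == '-') && (c == '-'))) && pvNoAdj [c]) = true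
    by_cases h1 : x = '-' <;> by_cases h2 : c = '-' <;> simp_all [pvNoAdj]
  | case3 x y t ih =>
    rw [pvNoAdj] at h
    simp only [Bool.and_eq_true] at h
    rw [List.cons_append, List.cons_append, pvNoAdj, ← List.cons_append]
    simp only [Bool.and_eq_true]
    exact ⟨h.1, ih h.2 (by simpa using hc)⟩

theorem pvDedup_append_hyphen (acc t : List Char) (h : acc.getLast? = some '-') :
    pvDedup (acc ++ '-' :: t) = pvDedup (acc ++ t) := by
  induction acc using pvNoAdj.induct with
  | case1 => simp at h
  | case2 x =>
    simp only [List.getLast?_singleton, Option.some.injEq] at h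
    subst h
    simp only [List.singleton_append]
    rw [pvDedup_cons, if_pos ⟨rfl, rfl⟩]
  | case3 x y t' ih =>
    have hlast : (y :: t').getLast? = some '-' := by
      simpa [List.getLast?_cons_cons] using h
    rw [show (x :: y :: t') ++ '-' :: t = x :: ((y :: t') ++ '-' :: t) from rfl]
    rw [show (x :: y :: t') ++ t = x :: ((y :: t') ++ t) from rfl]
    rw [pvDedup_cons, pvDedup_cons]
    rw [show ((y :: t') ++ '-' :: t).head? = some y from rfl]
    rw [show ((y :: t') ++ t).head? = some y from rfl]
    rw [ih hlast]

theorem pvFold_main (t acc : List Char) (hne : acc ≠ []) (hna : pvNoAdj acc = true) :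
    t.foldl pvStep' acc = pvDedup (acc ++ t) := by
  induction t generalizing acc with
  | nil => simpa using (pvNoAdj_id acc hna).symm
  | cons c t' ih =>
    rw [List.foldl_cons]
    by_cases hc : c = '-'
    · subst hc
      by_cases hl : acc.getLast? = some '-'
      · rw [pvStep', if_pos rfl, if_neg (by simp [hl])]
        rw [ih acc hne hna, pvDedup_append_hyphen acc t' hl]
      · rw [pvStep', if_pos rfl, if_pos ⟨hne, hl⟩]
        rw [ih (acc ++ ['-']) (by simp) (pvNoAdj_append acc '-' hna (by simp [hl]))]
        simp
    · rw [pvStep', if_neg hc]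
      rw [ih (acc ++ [c]) (by simp) (pvNoAdj_append acc c hna (by simp [hc]))]
      simp

theorem pvFold_nil (l : List Char) :
    l.foldl pvStep' [] = pvDedup (l.dropWhile (fun c => c = '-')) := by
  induction l with
  | nil => rfl
  | cons c t ih =>
    by_cases hc : c = '-'
    · subst hc
      rw [List.foldl_cons, pvStep', if_pos rfl, if_neg (by simp)]
      rw [ih, List.dropWhile_cons_of_pos (by simp)]
    · rw [List.foldl_cons, pvStep', if_neg hc]
      rw [List.dropWhile_cons_of_neg (by simp [hc])]
      simp only [List.nil_append]
      rw [pvFold_main t [c] (by simp) rfl]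
      rfl

theorem pvDropWhile_of_head (l : List Char) (h : l.head? ≠ some '-') :
    l.dropWhile (fun c => c = '-') = l := by
  cases l with
  | nil => rfl
  | cons c t =>
    have hc : ¬ c = '-' := by intro hc; exact h (by simp [hc])
    rw [List.dropWhile_cons_of_neg (by simp [hc])]

theorem pvDedup_dropWhile (l : List Char) :
    pvDedup (l.dropWhile (fun c => c = '-')) = (pvDedup l).dropWhile (fun c => c = '-') := by
  induction l with
  | nil => rfl
  | cons c t ih =>
    by_cases hc : c = '-'
    · subst hc
      rw [List.dropWhile_cons_of_pos (by simp)]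
      rw [pvDedup_cons]
      by_cases ht : t.head? = some '-'
      · rw [if_pos ⟨rfl, ht⟩, ih]
      · rw [if_neg (by simpa using ht)]
        rw [List.dropWhile_cons_of_pos (by simp)]
        rw [ih]
    · rw [List.dropWhile_cons_of_neg (by simp [hc])]
      rw [pvDedup_cons, if_neg (by simp [hc])]
      rw [List.dropWhile_cons_of_neg (by simp [hc])]

theorem pvNoAdj_last (l : List Char) (h : pvNoAdj (l ++ ['-']) = true) :
    l.getLast? ≠ some '-' := by
  induction l with
  | nil => simp
  | cons x xs ih =>
    cases xs with
    | nil =>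
      simp only [List.singleton_append, pvNoAdj, Bool.and_eq_true] at h
      simp only [List.getLast?_singleton, ne_eq, Option.some.injEq]
      intro hx
      subst hx
      simp at h
    | cons y ys =>
      rw [List.cons_append, List.cons_append, pvNoAdj, ← List.cons_append] at h
      simp only [Bool.and_eq_true] at h
      rw [List.getLast?_cons_cons]
      exact ih h.2

theorem pvContains_pred :
    (fun c => ((['-'] : List Char).contains c)) = (fun c : Char => c = '-') := by
  funext c
  by_cases hc : c = '-' <;> simp [hc]

theorem pvRstrip_pop (l : List Char) (h : pvNoAdj l = true) :
    (List.dropWhile (fun c : Char => c = '-') l.reverse).reverse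
      = if l.getLast? = some '-' then l.dropLast else l := by
  induction l using List.reverseRecOn with
  | nil => simp
  | append_singleton l' c _ =>
    by_cases hc : c = '-'
    · subst hc
      rw [List.reverse_append]
      simp only [List.reverse_singleton, List.singleton_append]
      rw [List.dropWhile_cons_of_pos (by simp)]
      have hlast : l'.getLast? ≠ some '-' := pvNoAdj_last l' h
      have hh : l'.reverse.head? ≠ some '-' := by
        rw [List.head?_reverse]; exact hlast
      rw [pvDropWhile_of_head _ hh]
      simp
    · rw [List.reverse_append]
      simp only [List.reverse_singleton, List.singleton_append]
      rw [List.dropWhile_cons_of_neg (by simp [hc])]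
      rw [if_neg (by simp [hc])]
      simp

theorem pvFoldB_eq (cs : List Char) (acc : List Char) :
    cs.foldl (fun out ch =>
      let ch := if ch = ' ' ∨ ch = '.' then '-' else ch
      if PySem.Chars.isalnum ch then out ++ [ch]
      else if ch = '-' ∧ out ≠ [] ∧ out.getLast? ≠ some '-' then out ++ ['-']
      else out) acc = ((cs.map pvM).filter pvOk).foldl pvStep' acc := by
  induction cs generalizing acc with
  | nil => rfl
  | cons c t ih =>
    simp only [List.foldl_cons, List.map_cons, List.filter_cons]
    have hl : (if PySem.Chars.isalnum (if c = ' ' ∨ c = '.' then '-' else c) = true then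
          acc ++ [if c = ' ' ∨ c = '.' then '-' else c]
        else
          if (if c = ' ' ∨ c = '.' then '-' else c) = '-' ∧ acc ≠ [] ∧ acc.getLast? ≠ some '-' then
            acc ++ ['-']
          else acc)
        = if pvOk (pvM c) = true then pvStep' acc (pvM c) else acc := by
      show (if PySem.Chars.isalnum (pvM c) then acc ++ [pvM c]
            else if pvM c = '-' ∧ acc ≠ [] ∧ acc.getLast? ≠ some '-' then acc ++ ['-'] else acc)
            = if pvOk (pvM c) = true then pvStep' acc (pvM c) else acc
      by_cases hA : PySem.Chars.isalnum (pvM c) = true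
      · have hne : ¬ pvM c = '-' := by
          intro he
          rw [he] at hA
          exact absurd hA (by decide)
        rw [if_pos hA, if_pos (by simp [pvOk, hA]), pvStep', if_neg hne]
      · rw [if_neg hA]
        by_cases hH : pvM c = '-'
        · rw [if_pos (show pvOk (pvM c) = true by simp [pvOk, hH]), pvStep', if_pos hH]
          split_ifs with h1 h2 h3
          · rfl
          · exact absurd ⟨h1.2.1, h1.2.2⟩ h2
          · exact absurd ⟨hH, h3.1, h3.2⟩ h1
          · rfl
        · rw [if_neg (show ¬(pvM c = '-' ∧ acc ≠ [] ∧ acc.getLast? ≠ some '-') from fun h => hH h.1),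
              if_neg (show ¬ pvOk (pvM c) = true by simp [pvOk, hA, hH])]
    rw [hl]
    by_cases hOk : pvOk (pvM c) = true
    · rw [if_pos hOk, if_pos hOk, List.foldl_cons]
      exact ih _
    · rw [if_neg hOk, if_neg hOk]
      exact ih _

theorem pvLists_eq (cs : List Char) :
    PySem.Chars.stripChars (pvDedup ((cs.map pvM).filter pvOk)) ['-']
      = (if ((cs.map pvM).filter pvOk).foldl pvStep' [] ≠ [] ∧
            (((cs.map pvM).filter pvOk).foldl pvStep' []).getLast? = some '-'
         then (((cs.map pvM).filter pvOk).foldl pvStep' []).dropLast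
         else ((cs.map pvM).filter pvOk).foldl pvStep' []) := by
  have hfold := pvFold_nil ((cs.map pvM).filter pvOk)
  rw [hfold]
  simp only [PySem.Chars.stripChars, pvContains_pred]
  rw [show (List.dropWhile (fun c : Char => c = '-') (pvDedup ((cs.map pvM).filter pvOk)))
        = pvDedup (((cs.map pvM).filter pvOk).dropWhile (fun c : Char => c = '-'))
      from (pvDedup_dropWhile _).symm]
  rw [pvRstrip_pop _ (pvNoAdj_pvDedup _)]
  by_cases hnil : pvDedup (((cs.map pvM).filter pvOk).dropWhile (fun c : Char => c = '-')) = []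
  · rw [hnil]
    simp
  · by_cases hlast : (pvDedup (((cs.map pvM).filter pvOk).dropWhile (fun c : Char => c = '-'))).getLast? = some '-'
    · rw [if_pos hlast, if_pos ⟨hnil, hlast⟩]
    · rw [if_neg hlast, if_neg (by tauto)]

theorem pvMapA (cs : List Char) :
    (PySem.Chars.replace (PySem.Chars.replace cs [' '] ['-']) ['.'] ['-']) = cs.map pvM := by
  rw [pvReplOne, pvReplOne, List.map_map]
  apply List.map_congr_left
  intro c _
  by_cases h1 : c = ' ' <;> by_cases h2 : c = '.' <;>
    simp_all [pvM, Function.comp]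

-- ===== VERDICT (by name: the statement is the Claim_ definition above) =====
theorem generate_jmx_name_py_spec : Claim_equal_generate_jmx_name_py := by
  intro s _
  show generate_jmx_name_py s = generate_jmx_name_py_alt s
  simp only [generate_jmx_name_py, generate_jmx_name_py_alt]
  rw [pvFoldB_eq]
  simp only [PySem.Str.replace, String.toList_ofList]
  rw [show (" " : String).toList = [' '] from rfl, show ("." : String).toList = ['.'] from rfl,
     show ("-" : String).toList = ['-'] from rfl]
  rw [pvMapA]
  rw [show (fun c => PySem.Chars.isalnum c || c == '-') = pvOk from rfl]
  rw [pvCollapse_eq, String.toList_ofList]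
  simp only [PySem.Str.stripChars, String.toList_ofList]
  rw [show ("-" : String).toList = ['-'] from rfl]
  rw [pvLists_eq]
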